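-- pv_equiv track=rewrite | github.com/Amir-Nassimi/Customer-Service | Src/Main_Algorithm/Code/handler.py | analyze_hold
-- ===== SOURCE A (Python) =====
-- def analyze_hold(time_stamps):
--     def extract_time(ts):
--         return ts.split()[0]
--
--     # Convert time stamps to a list of times
--     times = [extract_time(ts) for ts in time_stamps]
--
--     # Identify continuous sections
--     sections = []
--     try:
--         start = times[0]
--     except IndexError:
--         return ''
--
--     # Loop through the list to detect breaks and record sections
--     for i in range(1, len(times)):
--         current_time = times[i]
--         previous_time = times[i - 1]
--
--         # Calculate the difference in seconds
--         time_gap = int(current_time[-2:]) - int(previous_time[-2:])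
--
--         if time_gap > 1:  # Break in the sequence
--             sections.append((start, previous_time))
--             start = current_time
--
--     # Add the final section
--     sections.append((start, times[-1]))
--
--     # Generate human-readable messages for each section
--     output_messages = [f"Hold from {s[0]} to {s[1]}" for s in sections]
--
--     return output_messages
-- ===== SOURCE B (Python) =====
-- def analyze_hold(time_stamps):
--     if not time_stamps:
--         return ''
--     times = [ts.split()[0] for ts in time_stamps]
--     breaks = [i for i in range(1, len(times))
--               if int(times[i][-2:]) - int(times[i - 1][-2:]) > 1]
--     bounds = [0] + breaks + [len(times)]
--     return [f"Hold from {times[lo]} to {times[hi - 1]}"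
--             for lo, hi in zip(bounds, bounds[1:])]
-- ===== Notes on version B (the rewrite author's own statement) =====
-- stated objective: alternative
-- what changed: Replaces A's stateful fold carrying (sections, start) with a direct decomposition: compute the list of break positions, turn it into section boundary pairs with zip, and map each pair to its message.
-- outside the precondition, e.g. on analyze_hold([]): A returns '', B returns ''
import Mathlib
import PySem

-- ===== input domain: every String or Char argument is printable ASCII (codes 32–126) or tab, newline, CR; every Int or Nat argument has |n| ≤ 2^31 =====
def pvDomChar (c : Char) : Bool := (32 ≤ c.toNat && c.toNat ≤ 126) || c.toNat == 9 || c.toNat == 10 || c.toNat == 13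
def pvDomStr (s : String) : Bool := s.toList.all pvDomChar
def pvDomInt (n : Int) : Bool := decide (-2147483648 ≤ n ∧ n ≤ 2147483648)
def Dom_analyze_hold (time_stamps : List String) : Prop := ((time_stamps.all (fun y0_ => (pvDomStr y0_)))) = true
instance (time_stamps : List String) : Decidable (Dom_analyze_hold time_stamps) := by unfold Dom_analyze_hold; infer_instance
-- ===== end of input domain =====

-- B replaces A's stateful (sections, start) fold by a break-positions / boundary-pairs decomposition; return value only.
-- (On the empty list Python A returns '' — not a list — so that input is outside Pre_.)

-- shared helpers (the same Python subexpressions occur in both A and B):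
-- ts.split()[0]  (default "" only used outside Pre_)
def pvWord (ts : String) : String := PySem.List.pyGetD (PySem.Str.split₀ ts) 0 ""
-- int(t[-2:])  (default 0 only used outside Pre_)
def pvLast2 (t : String) : Int := (PySem.Int.ofStr? (PySem.Str.slice t (some (-2)) none)).getD 0
-- f"Hold from {s} to {e}"
def pvMsg (p : String × String) : String := String.ofList ("Hold from ".toList ++ p.1.toList ++ " to ".toList ++ p.2.toList)

-- ===== PORT A =====
def analyze_hold (time_stamps : List String) : List String :=
  let times := time_stamps.map pvWord
  match times with
  | [] => []  -- Python returns '' here (not a list); excluded by Pre_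
  | t0 :: _ =>
    let res :=
      (PySem.List.pyRange 1 (times.length : Int)).foldl
        (fun (st : List (String × String) × String) i =>
          let current := PySem.List.pyGetD times i ""
          let previous := PySem.List.pyGetD times (i - 1) ""
          let time_gap := pvLast2 current - pvLast2 previous
          if time_gap > 1 then (st.1 ++ [(st.2, previous)], current) else st)
        ([], t0)
    let sections := res.1 ++ [(res.2, PySem.List.pyGetD times (-1) "")]
    sections.map pvMsg

-- ===== PORT B =====
def analyze_hold_alt (time_stamps : List String) : List String :=
  match time_stamps with
  | [] => []  -- Python B returns '' here (not a list); excluded by Pre_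
  | _ =>
    let times := time_stamps.map pvWord
    let breaks :=
      (PySem.List.pyRange 1 (times.length : Int)).filter
        (fun i => decide (pvLast2 (PySem.List.pyGetD times i "") -
                          pvLast2 (PySem.List.pyGetD times (i - 1) "") > 1))
    let bounds := (0 : Int) :: (breaks ++ [(times.length : Int)])
    (bounds.zip (PySem.List.slice bounds (some 1) none)).map
      (fun lh => pvMsg (PySem.List.pyGetD times lh.1 "", PySem.List.pyGetD times (lh.2 - 1) ""))

-- ===== PRECONDITION & SPEC =====
-- Pre_ excludes exactly: the empty list (A returns the string '' rather than a list), any element that is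
-- whitespace-only (ts.split()[0] raises IndexError), and — when there are at least two elements — any
-- element whose first word's last two characters are not an int() literal (ValueError).
def Pre_analyze_hold (time_stamps : List String) : Prop :=
  time_stamps ≠ [] ∧
  ∀ ts ∈ time_stamps, PySem.Str.split₀ ts ≠ [] ∧
    (1 < time_stamps.length →
      (PySem.Int.ofStr? (PySem.Str.slice (pvWord ts) (some (-2)) none)).isSome = true)
instance (time_stamps : List String) : Decidable (Pre_analyze_hold time_stamps) := by
  unfold Pre_analyze_hold; infer_instance
def pvWitness_analyze_hold : List String := ["10:00:01 a", "10:00:02", "10:00:05"]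

def Spec_analyze_hold (time_stamps : List String) (out : List String) : Prop := out = analyze_hold_alt time_stamps
instance (time_stamps : List String) (out : List String) : Decidable (Spec_analyze_hold time_stamps out) := by unfold Spec_analyze_hold; infer_instance

-- ===== CLAIM (what is proved, stated in full; the proofs are below) =====
def Claim_equal_analyze_hold : Prop := ∀ (time_stamps : List String), Dom_analyze_hold time_stamps → Pre_analyze_hold time_stamps → Spec_analyze_hold time_stamps (analyze_hold time_stamps)

-- ===== LEMMAS AND PROOFS =====

-- consecutive pairs of x::xs ++ [y] are those of x::xs plus (last element, y)
theorem pv_zip_tail_append {α : Type} (x : α) (xs : List α) (y : α) :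
    (x :: (xs ++ [y])).zip (xs ++ [y]) = (x :: xs).zip xs ++ [(xs.getLastD x, y)] := by
  induction xs generalizing x with
  | nil => simp
  | cons b xs' ih =>
    simp only [List.cons_append, List.zip_cons_cons, List.getLastD_cons, ih b]

-- fold invariant: A's fold over range(1, n) equals B's break-positions decomposition
theorem pv_fold_inv (times : List String) (n : Nat)
    (step : List (String × String) × String → Int → List (String × String) × String)
    (bf : Int → Bool) (t0 : String) (ht0 : t0 = PySem.List.pyGetD times 0 "")
    (hstep : ∀ st i, step st i =
      if bf i then (st.1 ++ [(st.2, PySem.List.pyGetD times (i - 1) "")], PySem.List.pyGetD times i "")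
      else st) :
    (PySem.List.pyRange 1 (n : Int)).foldl step ([], t0) =
      (List.map (fun lh => (PySem.List.pyGetD times lh.1 "", PySem.List.pyGetD times (lh.2 - 1) ""))
         (((0 : Int) :: (PySem.List.pyRange 1 (n : Int)).filter bf).zip
           ((PySem.List.pyRange 1 (n : Int)).filter bf)),
       PySem.List.pyGetD times (((PySem.List.pyRange 1 (n : Int)).filter bf).getLastD 0) "") := by
  induction n with
  | zero => simp [PySem.List.pyRange, ht0]
  | succ m ih =>
    by_cases hm : m = 0
    · subst hm; simp [PySem.List.pyRange, ht0]
    · have h1 : (1 : Int) ≤ (m : Int) := by omega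
      have hsplit : PySem.List.pyRange 1 ((m + 1 : Nat) : Int) =
          PySem.List.pyRange 1 (m : Int) ++ [(m : Int)] := by
        push_cast
        exact PySem.List.pyRange_one_succ_right h1
      rw [hsplit, List.foldl_append, List.filter_append, ih]
      simp only [List.foldl_cons, List.foldl_nil, List.filter_cons, List.filter_nil]
      rw [hstep]
      by_cases hb : bf (m : Int)
      · simp only [hb, if_true]
        set brks := (PySem.List.pyRange 1 (m : Int)).filter bf with hbrks
        rw [pv_zip_tail_append, List.map_append, List.getLastD_concat]
        rcases brks with _ | ⟨c, cs⟩ <;> simp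
      · simp [hb]

theorem pv_cast_sub_one (n : Nat) (hn : n ≠ 0) : ((n : Int) - 1) = ((n - 1 : Nat) : Int) := by
  omega

-- the two port bodies agree, stated over the common `times` list
theorem pv_main (t0 : String) (tl times : List String) (heq : times = t0 :: tl) :
    List.map pvMsg
      ((List.foldl
            (fun (st : List (String × String) × String) i =>
              if pvLast2 (PySem.List.pyGetD times i "") -
                    pvLast2 (PySem.List.pyGetD times (i - 1) "") > 1 then
                (st.1 ++ [(st.2, PySem.List.pyGetD times (i - 1) "")],
                  PySem.List.pyGetD times i "")
              else st)
            ([], t0) (PySem.List.pyRange 1 (times.length : Int))).1 ++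
        [((List.foldl
                (fun (st : List (String × String) × String) i =>
                  if pvLast2 (PySem.List.pyGetD times i "") -
                        pvLast2 (PySem.List.pyGetD times (i - 1) "") > 1 then
                    (st.1 ++ [(st.2, PySem.List.pyGetD times (i - 1) "")],
                      PySem.List.pyGetD times i "")
                  else st)
                ([], t0) (PySem.List.pyRange 1 (times.length : Int))).2,
            PySem.List.pyGetD times (-1) "")]) =
    List.map
      (fun lh =>
        pvMsg
          (PySem.List.pyGetD times lh.1 "", PySem.List.pyGetD times (lh.2 - 1) ""))
      ((0 ::
            (List.filter
                (fun i =>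
                  decide
                    (pvLast2 (PySem.List.pyGetD times i "") -
                        pvLast2 (PySem.List.pyGetD times (i - 1) "") > 1))
                (PySem.List.pyRange 1 (times.length : Int)) ++
              [(times.length : Int)])).zip
        (PySem.List.slice
          (0 ::
            (List.filter
                (fun i =>
                  decide
                    (pvLast2 (PySem.List.pyGetD times i "") -
                        pvLast2 (PySem.List.pyGetD times (i - 1) "") > 1))
                (PySem.List.pyRange 1 (times.length : Int)) ++
              [(times.length : Int)]))
          (some 1))) := by
  have htne : times ≠ [] := by simp [heq]
  set bf : Int → Bool := fun i => decide (pvLast2 (PySem.List.pyGetD times i "") -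
      pvLast2 (PySem.List.pyGetD times (i - 1) "") > 1) with hbf
  have hfold := pv_fold_inv times times.length
    (fun (st : List (String × String) × String) i =>
      if pvLast2 (PySem.List.pyGetD times i "") -
            pvLast2 (PySem.List.pyGetD times (i - 1) "") > 1 then
        (st.1 ++ [(st.2, PySem.List.pyGetD times (i - 1) "")], PySem.List.pyGetD times i "")
      else st)
    bf t0
    (by simp [heq, PySem.List.pyGetD_zero_cons])
    (by intro st i; simp only [hbf, decide_eq_true_eq])
  rw [hfold]
  set brks := ((PySem.List.pyRange 1 (times.length : Int)).filter bf) with hbrks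
  have hlen : times.length ≠ 0 := by simp [heq]
  have hlast : PySem.List.pyGetD times (-1) "" =
      PySem.List.pyGetD times ((times.length : Int) - 1) "" := by
    rw [PySem.List.pyGetD_neg_one _ _ htne,
        pv_cast_sub_one _ hlen, PySem.List.pyGetD_natCast]
    rw [List.getLast_eq_getElem]
    have hb : times.length - 1 < times.length := by omega
    simp [List.getD, List.getElem?_eq_getElem hb]
  rw [PySem.List.slice_from_one, List.tail_cons,
      show ((0 : Int) :: (brks ++ [(times.length : Int)])).zip (brks ++ [(times.length : Int)]) =
        ((0 : Int) :: brks).zip brks ++ [(brks.getLastD 0, (times.length : Int))] from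
        pv_zip_tail_append 0 brks _]
  simp only [List.map_append, List.map_map, List.map_cons, List.map_nil, Function.comp_def]
  congr 1
  rw [hlast]

-- ===== VERDICT (by name: the statement is the Claim_ definition above) =====
theorem analyze_hold_spec : Claim_equal_analyze_hold := by
  intro ts _ hpre
  unfold Spec_analyze_hold analyze_hold analyze_hold_alt
  obtain ⟨hne, -⟩ := hpre
  cases ts with
  | nil => exact absurd rfl hne
  | cons t ts' =>
    simp only [List.map_cons]
    exact pv_main (pvWord t) (ts'.map pvWord) _ rfl
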